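-- pv_equiv track=rewrite | github.com/vaibhav-jain-dev/learning-algo | problems/200-must-solve/arrays/19-largest-range/similar/01-longest-consecutive-gap-k/python_code.py | longest_consecutive_gap_k
-- ===== SOURCE A (Python) =====
-- from typing import List
--
-- def longest_consecutive_gap_k(nums: List[int], k: int) -> int:
--     """
--     Find length of longest sequence with gap k between consecutive elements.
--
--     Args:
--         nums: List of integers
--         k: Required gap between consecutive elements
--
--     Returns:
--         Length of longest sequence with gap k
--     """
--     if not nums:
--         return 0
--
--     num_set = set(nums)
--     max_length = 0
--
--     for num in num_set:
--         # Only start from sequence beginnings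
--         if num - k not in num_set:
--             current = num
--             length = 1
--
--             while current + k in num_set:
--                 current += k
--                 length += 1
--
--             max_length = max(max_length, length)
--
--     return max_length
-- ===== SOURCE B (Python) =====
-- def longest_consecutive_gap_k(nums, k):
--     if not nums:
--         return 0
--     num_set = set(nums)
--     dp = {}
--     best = 0
--     # process values so that num - k is always handled before num
--     for num in sorted(num_set, reverse=(k < 0)):
--         dp[num] = dp.get(num - k, 0) + 1
--         if dp[num] > best:
--             best = dp[num]
--     return best
-- ===== Notes on version B (the rewrite author's own statement) =====
-- stated objective: alternative
-- what changed: Replaces A's start-detection plus forward while-walk per chain with a sort of the unique values and a single dynamic-programming pass dp[num] = dp.get(num-k,0)+1 (ascending for k>0, descending for k<0).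
-- intended difference: For non-empty nums with k=0 A returns 0 (no value ever qualifies as a chain start since num-0 is in the set), while B returns 1, the intended length of the longest gap-0 sequence: every single element is such a sequence. — e.g. on longest_consecutive_gap_k([5], 0): A returns 0, B returns 1
import Mathlib
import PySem

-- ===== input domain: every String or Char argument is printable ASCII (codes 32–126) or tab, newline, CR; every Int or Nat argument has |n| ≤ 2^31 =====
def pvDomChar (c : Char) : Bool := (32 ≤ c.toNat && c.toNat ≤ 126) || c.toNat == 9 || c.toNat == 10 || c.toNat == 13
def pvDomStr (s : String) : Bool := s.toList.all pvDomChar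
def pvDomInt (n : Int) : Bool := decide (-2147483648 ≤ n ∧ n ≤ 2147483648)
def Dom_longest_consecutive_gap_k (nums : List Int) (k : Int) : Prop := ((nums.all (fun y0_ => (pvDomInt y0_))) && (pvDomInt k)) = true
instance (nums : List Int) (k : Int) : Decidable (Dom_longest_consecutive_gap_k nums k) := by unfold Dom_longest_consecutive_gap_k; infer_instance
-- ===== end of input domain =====

-- B replaces A's start-detection + forward while-walk with sort-unique + a DP pass dp[num] = dp.get(num-k,0)+1;
-- objective: alternative (a genuinely different algorithm of similar cost; not claimed faster).

-- ===== PORT A =====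
-- the inner 'while current + k in num_set' loop; fuel only makes it total (chains have ≤ len(nums) steps)
def lcgk_while (num_set : PySem.Set Int) (k : Int) : Nat → Int → Int → Int
  | 0, _, length => length
  | fuel + 1, current, length =>
    if PySem.Set.contains num_set (current + k) then
      lcgk_while num_set k fuel (current + k) (length + 1)
    else length

def longest_consecutive_gap_k (nums : List Int) (k : Int) : Int :=
  if nums = [] then 0
  else
    let num_set : PySem.Set Int := PySem.Set.ofList nums
    num_set.foldl
      (fun max_length num =>
        if !(PySem.Set.contains num_set (num - k)) then
          max max_length (lcgk_while num_set k nums.length num 1)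
        else max_length) 0

-- ===== PORT B =====
-- one DP step: dp[num] = dp.get(num - k, 0) + 1, then update the running best
def lcgk_step (k : Int) (st : PySem.Dict Int Int × Int) (num : Int) : PySem.Dict Int Int × Int :=
  let v := st.1.getD (num - k) 0 + 1
  (st.1.insert num v, if v > st.2 then v else st.2)

def longest_consecutive_gap_k_alt (nums : List Int) (k : Int) : Int :=
  if nums = [] then 0
  else
    let num_set : PySem.Set Int := PySem.Set.ofList nums
    let order := PySem.List.sorted num_set (fun x => x) (decide (k < 0))
    (order.foldl (lcgk_step k) (PySem.Dict.empty, 0)).2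

-- ===== PRECONDITION & SPEC =====
-- For non-empty nums with k = 0, A returns 0 (num - 0 is always in the set, so no value ever counts as a
-- chain start), while B returns 1 — the intended length of the longest gap-0 sequence, since every single
-- element is such a sequence.
def D_longest_consecutive_gap_k (nums : List Int) (k : Int) : Prop := nums ≠ [] ∧ k = 0
instance (nums : List Int) (k : Int) : Decidable (D_longest_consecutive_gap_k nums k) := by
  unfold D_longest_consecutive_gap_k; infer_instance

def Spec_longest_consecutive_gap_k (nums : List Int) (k : Int) (out : Int) : Prop :=
  ¬ D_longest_consecutive_gap_k nums k → out = longest_consecutive_gap_k_alt nums k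
instance (nums : List Int) (k : Int) (out : Int) : Decidable (Spec_longest_consecutive_gap_k nums k out) := by
  unfold Spec_longest_consecutive_gap_k; infer_instance

def pvDiffWitness_longest_consecutive_gap_k : List Int × Int := ([5], 0)
def pvDiffWitnessOut_longest_consecutive_gap_k : Int × Int := (0, 1)

-- ===== CLAIM (what is proved, stated in full; the proofs are below) =====
def Claim_unchanged_longest_consecutive_gap_k : Prop := ∀ (nums : List Int) (k : Int), Dom_longest_consecutive_gap_k nums k → Spec_longest_consecutive_gap_k nums k (longest_consecutive_gap_k nums k)
def Claim_changed_longest_consecutive_gap_k : Prop := Dom_longest_consecutive_gap_k (pvDiffWitness_longest_consecutive_gap_k.1) (pvDiffWitness_longest_consecutive_gap_k.2) ∧ D_longest_consecutive_gap_k (pvDiffWitness_longest_consecutive_gap_k.1) (pvDiffWitness_longest_consecutive_gap_k.2) ∧ longest_consecutive_gap_k (pvDiffWitness_longest_consecutive_gap_k.1) (pvDiffWitness_longest_consecutive_gap_k.2) = pvDiffWitnessOut_longest_consecutive_gap_k.1 ∧ longest_consecutive_gap_k_alt (pvDiffWitness_longest_consecutive_gap_k.1) (pvDiffWitness_longest_consecutive_gap_k.2)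 = pvDiffWitnessOut_longest_consecutive_gap_k.2 ∧ pvDiffWitnessOut_longest_consecutive_gap_k.1 ≠ pvDiffWitnessOut_longest_consecutive_gap_k.2
def Claim_exact_longest_consecutive_gap_k : Prop := ∀ (nums : List Int) (k : Int), Dom_longest_consecutive_gap_k nums k → D_longest_consecutive_gap_k nums k → longest_consecutive_gap_k nums k ≠ longest_consecutive_gap_k_alt nums k

-- ===== LEMMAS AND PROOFS =====

-- backward chain length of x in S (with gap k), fuel-bounded; the value B's dp stores at x
def bchainF (S : List Int) (k : Int) : Nat → Int → Int
  | 0, _ => 1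
  | f + 1, x => if x - k ∈ S then bchainF S k f (x - k) + 1 else 1

-- A's fold body, named for the proofs
def lcgkA_step (S : PySem.Set Int) (k : Int) (f : Nat) (acc num : Int) : Int :=
  if !(PySem.Set.contains S (num - k)) then max acc (lcgk_while S k f num 1) else acc

-- a chain of n distinct values inside a duplicate-free list has length ≤ the list's length
theorem lcgk_chain_bound (S : List Int) (k x : Int) (n : Nat) (hk : k ≠ 0)
    (h : ∀ i : Nat, i < n → x - (i : Int) * k ∈ S) : n ≤ S.length := by
  have hinj : Function.Injective (fun i : Nat => x - (i : Int) * k) := by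
    intro i j hij
    simp only at hij
    have : (i : Int) * k = (j : Int) * k := by omega
    have := mul_right_cancel₀ hk this
    exact_mod_cast this
  have hnd : ((List.range n).map (fun i : Nat => x - (i : Int) * k)).Nodup :=
    (List.nodup_range).map hinj
  have hsub : ((List.range n).map (fun i : Nat => x - (i : Int) * k)) ⊆ S := by
    intro y hy
    simp only [List.mem_map, List.mem_range] at hy
    obtain ⟨i, hi, rfl⟩ := hy
    exact h i hi
  have := (hnd.subperm hsub).length_le
  simpa using this

theorem lcgk_bchain_eq (S : List Int) (k : Int) (c : Nat) :
    ∀ (x : Int) (f : Nat), 1 ≤ c → c ≤ f →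
    (∀ i : Nat, i < c → x - (i : Int) * k ∈ S) → x - (c : Int) * k ∉ S →
    bchainF S k f x = (c : Int) := by
  induction c with
  | zero => intro x f h1; omega
  | succ c IH =>
    intro x f h1 hcf hin hout
    obtain ⟨f', rfl⟩ : ∃ f', f = f' + 1 := ⟨f - 1, by omega⟩
    rcases Nat.eq_zero_or_pos c with rfl | hc
    · have hnot : x - k ∉ S := by
        have := hout; push_cast at this; simpa using this
      simp [bchainF, hnot]
    · have hmem : x - k ∈ S := by
        have := hin 1 (by omega); push_cast at this; simpa using this
      have htail : bchainF S k f' (x - k) = (c : Int) := by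
        apply IH (x - k) f' hc (by omega)
        · intro i hi
          have := hin (i + 1) (by omega)
          have heq : x - ((i : Int) + 1) * k = x - k - (i : Int) * k := by ring
          push_cast at this ⊢
          rw [← heq]; exact this
        · have heq : x - ((c : Int) + 1) * k = x - k - (c : Int) * k := by ring
          push_cast at hout ⊢
          rw [← heq]; exact hout
      simp [bchainF, hmem, htail]

-- every value of S starts a maximal backward chain of some length c ≤ |S|
theorem lcgk_bpred_exists (S : List Int) (k x : Int) (hk : k ≠ 0) (hx : x ∈ S) :
    ∃ c : Nat, 1 ≤ c ∧ c ≤ S.length ∧ (∀ i : Nat, i < c → x - (i : Int) * k ∈ S) ∧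
      x - (c : Int) * k ∉ S := by
  have hex : ∃ j : Nat, x - (j : Int) * k ∉ S := by
    by_contra hall
    push Not at hall
    have := lcgk_chain_bound S k x (S.length + 1) hk (fun i _ => hall i)
    omega
  classical
  have hout : x - ((Nat.find hex : Nat) : Int) * k ∉ S := Nat.find_spec hex
  have hin : ∀ i : Nat, i < Nat.find hex → x - (i : Int) * k ∈ S := by
    intro i hi
    have := Nat.find_min hex hi
    exact not_not.mp this
  generalize hc : Nat.find hex = c at hout hin
  have h1 : 1 ≤ c := by
    rcases Nat.eq_zero_or_pos c with h0 | h; swap; exact h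
    exfalso; apply hout
    rw [h0]; simpa using hx
  refine ⟨c, h1, ?_, hin, hout⟩
  exact lcgk_chain_bound S k x c hk hin

-- every value of S starts a maximal forward chain of some length m + 1 ≤ |S|
theorem lcgk_fpred_exists (S : List Int) (k x : Int) (hk : k ≠ 0) (hx : x ∈ S) :
    ∃ m : Nat, m + 1 ≤ S.length ∧ (∀ i : Nat, 1 ≤ i → i ≤ m → x + (i : Int) * k ∈ S) ∧
      x + ((m : Int) + 1) * k ∉ S := by
  have hex : ∃ j : Nat, x + ((j : Int) + 1) * k ∉ S := by
    by_contra hall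
    push Not at hall
    have hchain : ∀ i : Nat, i < S.length + 1 → x - (i : Int) * (-k) ∈ S := by
      intro i hi
      rcases Nat.eq_zero_or_pos i with rfl | hip
      · simpa using hx
      · obtain ⟨j, rfl⟩ : ∃ j, i = j + 1 := ⟨i - 1, by omega⟩
        have := hall j
        have heq : x - ((j : Int) + 1) * (-k) = x + ((j : Int) + 1) * k := by ring
        push_cast at heq ⊢
        rw [heq]; exact this
    have := lcgk_chain_bound S (-k) x (S.length + 1) (by simpa using hk) hchain
    omega
  classical
  have hout : x + (((Nat.find hex : Nat) : Int) + 1) * k ∉ S := Nat.find_spec hex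
  have hin : ∀ i : Nat, 1 ≤ i → i ≤ Nat.find hex → x + (i : Int) * k ∈ S := by
    intro i h1 h2
    have hlt : i - 1 < Nat.find hex := by omega
    have := not_not.mp (Nat.find_min hex hlt)
    have heq : (((i - 1 : Nat) : Int) + 1) = (i : Int) := by omega
    rw [heq] at this
    exact this
  generalize hm : Nat.find hex = m at hout hin
  refine ⟨m, ?_, hin, hout⟩
  have hchain : ∀ i : Nat, i < m + 1 → x - (i : Int) * (-k) ∈ S := by
    intro i hi
    rcases Nat.eq_zero_or_pos i with rfl | hip
    · simpa using hx
    · have := hin i hip (by omega)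
      have heq : x - (i : Int) * (-k) = x + (i : Int) * k := by ring
      rw [heq]; exact this
  exact lcgk_chain_bound S (-k) x (m + 1) (by simpa using hk) hchain

-- the while loop walks the forward chain to its end
theorem lcgk_while_eq (S : List Int) (k : Int) (m : Nat) :
    ∀ (f : Nat) (cur ℓ : Int), m ≤ f →
    (∀ i : Nat, 1 ≤ i → i ≤ m → cur + (i : Int) * k ∈ S) →
    cur + ((m : Int) + 1) * k ∉ S →
    lcgk_while S k f cur ℓ = ℓ + (m : Int) := by
  induction m with
  | zero =>
    intro f cur ℓ _ _ hout
    have hnot : cur + k ∉ S := by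
      push_cast at hout
      simpa using hout
    cases f <;> simp [lcgk_while, PySem.Set.contains, hnot]
  | succ m IH =>
    intro f cur ℓ hmf hin hout
    obtain ⟨f', rfl⟩ : ∃ f', f = f' + 1 := ⟨f - 1, by omega⟩
    have hmem : cur + k ∈ S := by
      have := hin 1 (by omega) (by omega); push_cast at this; simpa using this
    have hrec : lcgk_while S k f' (cur + k) (ℓ + 1) = (ℓ + 1) + (m : Int) := by
      apply IH f' (cur + k) (ℓ + 1) (by omega)
      · intro i h1 h2
        have := hin (i + 1) (by omega) (by omega)
        have heq : cur + ((i : Int) + 1) * k = cur + k + (i : Int) * k := by ring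
        push_cast at this
        rw [heq] at this; exact this
      · push_cast at hout
        have heq : cur + ((m : Int) + 1 + 1) * k = cur + k + ((m : Int) + 1) * k := by ring
        rw [heq] at hout; exact hout
    simp only [lcgk_while]
    have hc : PySem.Set.contains S (cur + k) = true := by
      simp [PySem.Set.contains, hmem]
    rw [hc]
    simp only [if_true, hrec]
    push_cast; ring

theorem lcgk_bchain_notmem (S : List Int) (k x : Int) (f : Nat) (h : x - k ∉ S) :
    bchainF S k f x = 1 := by
  cases f <;> simp [bchainF, h]

theorem lcgk_bchain_succ (S : List Int) (k x : Int) (hk : k ≠ 0)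
    (hx : x ∈ S) (hxk : x - k ∈ S) :
    bchainF S k S.length x = bchainF S k S.length (x - k) + 1 := by
  obtain ⟨c, h1, hcl, hin, hout⟩ := lcgk_bpred_exists S k x hk hx
  have hc2 : 2 ≤ c := by
    rcases Nat.lt_or_ge c 2 with h | h
    · exfalso
      have : c = 1 := by omega
      subst this
      apply hout
      push_cast
      simpa using hxk
    · exact h
  have hx_eq : bchainF S k S.length x = (c : Int) :=
    lcgk_bchain_eq S k c x S.length h1 hcl hin hout
  have hxk_eq : bchainF S k S.length (x - k) = ((c - 1 : Nat) : Int) := by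
    apply lcgk_bchain_eq S k (c - 1) (x - k) S.length (by omega) (by omega)
    · intro i hi
      have := hin (i + 1) (by omega)
      have heq : x - ((i : Int) + 1) * k = x - k - (i : Int) * k := by ring
      push_cast at this
      rw [← heq]; exact this
    · have heq : x - ((c : Int)) * k = x - k - ((c : Int) - 1) * k := by ring
      rw [heq] at hout
      have hcast : (((c - 1 : Nat)) : Int) = (c : Int) - 1 := by omega
      rw [hcast]; exact hout
  rw [hx_eq, hxk_eq]
  omega

-- A-side fold bounds
theorem lcgkA_fold_ge_acc (S : List Int) (k : Int) (f : Nat) (l : List Int) :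
    ∀ acc : Int, acc ≤ l.foldl (lcgkA_step S k f) acc := by
  induction l with
  | nil => intro acc; simp
  | cons x t IH =>
    intro acc
    refine le_trans ?_ (IH (lcgkA_step S k f acc x))
    unfold lcgkA_step
    split <;> simp

theorem lcgkA_fold_ge (S : List Int) (k : Int) (f : Nat) (l : List Int) :
    ∀ acc : Int, ∀ x ∈ l, x - k ∉ S →
      lcgk_while S k f x 1 ≤ l.foldl (lcgkA_step S k f) acc := by
  induction l with
  | nil => intro acc x hx; simp at hx
  | cons a t IH =>
    intro acc x hx hnot
    rcases List.mem_cons.mp hx with rfl | hxt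
    · refine le_trans ?_ (lcgkA_fold_ge_acc S k f t _)
      unfold lcgkA_step
      have : PySem.Set.contains S (x - k) = false := by
        simp [PySem.Set.contains, hnot]
      rw [this]; simp
    · exact IH _ x hxt hnot

theorem lcgkA_fold_le (S : List Int) (k : Int) (f : Nat) (l : List Int) :
    ∀ (acc C : Int), acc ≤ C → (∀ x ∈ l, x - k ∉ S → lcgk_while S k f x 1 ≤ C) →
    l.foldl (lcgkA_step S k f) acc ≤ C := by
  induction l with
  | nil => intro acc C h _; simpa using h
  | cons a t IH =>
    intro acc C hacc h
    simp only [List.foldl_cons]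
    apply IH _ C ?_ (fun x hx => h x (List.mem_cons_of_mem a hx))
    unfold lcgkA_step
    by_cases hmem : a - k ∈ S
    · simp [PySem.Set.contains, hmem, hacc]
    · have : PySem.Set.contains S (a - k) = false := by simp [PySem.Set.contains, hmem]
      rw [this]
      simp only [Bool.not_false, if_true]
      exact max_le hacc (h a List.mem_cons_self hmem)

-- B-side loop invariant: after processing l (whose predecessors are always processed first),
-- the best is 0 or an attained backward chain length, and bounds all of them
theorem lcgk_B_inv (S : List Int) (k : Int) (R : Int → Int → Prop)
    (hk : k ≠ 0) (hR : ∀ a b, R a b → b ≠ a - k) :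
    ∀ (l pre : List Int) (dp : PySem.Dict Int Int) (best : Int),
    (∀ a ∈ l, a - k ∈ S → a - k ∈ pre ∨ a - k ∈ l) →
    l.Pairwise R →
    (∀ a ∈ l, a ∈ S) → (∀ a ∈ pre, a ∈ S) →
    (∀ y ∈ pre, dp.get? y = some (bchainF S k S.length y)) →
    (∀ y : Int, y ∉ pre → dp.get? y = none) →
    0 ≤ best → (∀ y ∈ pre, bchainF S k S.length y ≤ best) →
    (best = 0 ∨ ∃ y ∈ pre, best = bchainF S k S.length y) →
    0 ≤ (l.foldl (lcgk_step k) (dp, best)).2 ∧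
    (∀ y ∈ pre ++ l, bchainF S k S.length y ≤ (l.foldl (lcgk_step k) (dp, best)).2) ∧
    ((l.foldl (lcgk_step k) (dp, best)).2 = 0 ∨
      ∃ y ∈ pre ++ l, (l.foldl (lcgk_step k) (dp, best)).2 = bchainF S k S.length y) := by
  intro l
  induction l with
  | nil =>
    intro pre dp best _ _ _ _ _ _ hb0 hbub hbmem
    simpa using ⟨hb0, hbub, hbmem⟩
  | cons num t IH =>
    intro pre dp best H1 H2 H3 H4 Hdp1 Hdp2 Hb0 Hbub Hbmem
    have hnumS : num ∈ S := H3 num List.mem_cons_self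
    have hpair := List.pairwise_cons.mp H2
    have hv : dp.getD (num - k) 0 + 1 = bchainF S k S.length num := by
      by_cases hmem : num - k ∈ S
      · have hpre : num - k ∈ pre := by
          rcases H1 num List.mem_cons_self hmem with h | h
          · exact h
          · rcases List.mem_cons.mp h with heq | ht
            · exact absurd heq.symm (by intro hh; apply hk; omega)
            · exact absurd rfl (hR num (num - k) (hpair.1 _ ht) )
        rw [PySem.Dict.getD_of_get?_eq_some dp 0 (Hdp1 _ hpre)]
        exact (lcgk_bchain_succ S k num hk hnumS hmem).symm
      · have hnpre : num - k ∉ pre := fun h => hmem (H4 _ h)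
        rw [PySem.Dict.getD_of_get?_eq_none dp 0 (Hdp2 _ hnpre)]
        rw [lcgk_bchain_notmem S k num S.length hmem]
        omega
    have hstep : List.foldl (lcgk_step k) (dp, best) (num :: t) =
        List.foldl (lcgk_step k) (dp.insert num (bchainF S k S.length num),
          if bchainF S k S.length num > best then bchainF S k S.length num else best) t := by
      simp only [List.foldl_cons, lcgk_step, hv]
    rw [hstep]
    have hkey := IH (pre ++ [num]) (dp.insert num (bchainF S k S.length num))
      (if bchainF S k S.length num > best then bchainF S k S.length num else best)
      ?_ hpair.2 (fun a ha => H3 a (List.mem_cons_of_mem _ ha)) ?_ ?_ ?_ ?_ ?_ ?_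
    · refine ⟨hkey.1, ?_, ?_⟩
      · intro y hy
        apply hkey.2.1
        simp only [List.append_assoc, List.singleton_append]
        exact hy
      · rcases hkey.2.2 with h | ⟨y, hy, h⟩
        · exact Or.inl h
        · refine Or.inr ⟨y, ?_, h⟩
          simpa [List.append_assoc] using hy
    · intro a ha hakS
      rcases H1 a (List.mem_cons_of_mem _ ha) hakS with h | h
      · exact Or.inl (List.mem_append_left _ h)
      · rcases List.mem_cons.mp h with heq | ht
        · exact Or.inl (List.mem_append_right _ (by simp [heq]))
        · exact Or.inr ht
    · intro a ha
      rcases List.mem_append.mp ha with h | h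
      · exact H4 a h
      · simpa using (List.mem_singleton.mp h) ▸ hnumS
    · intro y hy
      rcases List.mem_append.mp hy with h | h
      · by_cases hyn : y = num
        · subst hyn; rw [PySem.Dict.get?_insert_self]
        · rw [PySem.Dict.get?_insert_of_ne dp _ hyn]
          exact Hdp1 y h
      · have : y = num := List.mem_singleton.mp h
        subst this; rw [PySem.Dict.get?_insert_self]
    · intro y hy
      have hyn : y ≠ num := fun h => hy (List.mem_append_right _ (by simp [h]))
      rw [PySem.Dict.get?_insert_of_ne dp _ hyn]
      exact Hdp2 y (fun h => hy (List.mem_append_left _ h))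
    · split <;> omega
    · intro y hy
      rcases List.mem_append.mp hy with h | h
      · have := Hbub y h; split <;> omega
      · have : y = num := List.mem_singleton.mp h
        subst this; split <;> omega
    · split
      · exact Or.inr ⟨num, List.mem_append_right _ (by simp), rfl⟩
      · rcases Hbmem with h | ⟨y, hy, h⟩
        · exact Or.inl h
        · exact Or.inr ⟨y, List.mem_append_left _ hy, h⟩

-- A's value at a chain start equals B's dp value at the chain's end
theorem lcgk_up_eq_down (S : List Int) (k x : Int) (hk : k ≠ 0) (hx : x ∈ S)
    (hnot : x - k ∉ S) (f : Nat) (hf : S.length ≤ f) :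
    ∃ e ∈ S, lcgk_while S k f x 1 = bchainF S k S.length e := by
  obtain ⟨m, hm1, hin, hout⟩ := lcgk_fpred_exists S k x hk hx
  have hw : lcgk_while S k f x 1 = 1 + (m : Int) :=
    lcgk_while_eq S k m f x 1 (by omega) hin hout
  refine ⟨x + (m : Int) * k, ?_, ?_⟩
  · rcases Nat.eq_zero_or_pos m with rfl | hmp
    · simpa using hx
    · simpa using hin m hmp le_rfl
  · rw [hw]
    have hbc : bchainF S k S.length (x + (m : Int) * k) = ((m + 1 : Nat) : Int) := by
      apply lcgk_bchain_eq S k (m + 1) _ S.length (by omega) (by omega)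
      · intro i hi
        obtain ⟨j, hj⟩ : ∃ j : Nat, i + j = m := ⟨m - i, by omega⟩
        have hm : (m : Int) = (i : Int) + (j : Int) := by omega
        have heq : x + (m : Int) * k - (i : Int) * k = x + (j : Int) * k := by
          rw [hm]; ring
        rw [heq]
        rcases Nat.eq_zero_or_pos j with rfl | hjp
        · simpa using hx
        · exact hin j hjp (by omega)
      · have heq : x + (m : Int) * k - ((m + 1 : Nat) : Int) * k = x - k := by
          push_cast; ring
        rw [heq]
        intro hmm
        exact hnot hmm
    rw [hbc]
    push_cast; ring

-- B's dp value at any y is at most A's value at the start of y's chain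
theorem lcgk_down_le_up (S : List Int) (k y : Int) (hk : k ≠ 0) (hy : y ∈ S)
    (f : Nat) (hf : S.length ≤ f) :
    ∃ s ∈ S, s - k ∉ S ∧ bchainF S k S.length y ≤ lcgk_while S k f s 1 := by
  obtain ⟨c, hc1, hcl, hin, hout⟩ := lcgk_bpred_exists S k y hk hy
  have hby : bchainF S k S.length y = (c : Int) :=
    lcgk_bchain_eq S k c y S.length hc1 hcl hin hout
  refine ⟨y - ((c : Int) - 1) * k, ?_, ?_, ?_⟩
  · have := hin (c - 1) (by omega)
    have hcast : (((c - 1 : Nat)) : Int) = (c : Int) - 1 := by omega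
    rw [hcast] at this; exact this
  · have heq : y - ((c : Int) - 1) * k - k = y - (c : Int) * k := by ring
    rw [heq]; exact hout
  · have hsS : y - ((c : Int) - 1) * k ∈ S := by
      have := hin (c - 1) (by omega)
      have hcast : (((c - 1 : Nat)) : Int) = (c : Int) - 1 := by omega
      rw [hcast] at this; exact this
    obtain ⟨m, hm1, hin', hout'⟩ := lcgk_fpred_exists S k (y - ((c : Int) - 1) * k) hk hsS
    have hw : lcgk_while S k f (y - ((c : Int) - 1) * k) 1 = 1 + (m : Int) :=
      lcgk_while_eq S k m f _ 1 (by omega) hin' hout'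
    rw [hw, hby]
    by_contra hlt
    push Not at hlt
    have hmc : m + 2 ≤ c := by omega
    have hj := hin (c - m - 2) (by omega)
    apply hout'
    have hcast : (((c - m - 2 : Nat)) : Int) = (c : Int) - (m : Int) - 2 := by omega
    rw [hcast] at hj
    have heq : y - ((c : Int) - (m : Int) - 2) * k
        = y - ((c : Int) - 1) * k + ((m : Int) + 1) * k := by ring
    rw [heq] at hj; exact hj

-- unfolding the two ports on a non-empty input
theorem lcgk_A_unfold (nums : List Int) (k : Int) (hne : nums ≠ []) :
    longest_consecutive_gap_k nums k =
      (PySem.Set.ofList nums).foldl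
        (lcgkA_step (PySem.Set.ofList nums) k nums.length) 0 := by
  simp only [longest_consecutive_gap_k, if_neg hne]
  rfl

theorem lcgk_B_unfold (nums : List Int) (k : Int) (hne : nums ≠ []) :
    longest_consecutive_gap_k_alt nums k =
      ((PySem.List.sorted (PySem.Set.ofList nums) (fun x => x) (decide (k < 0))).foldl
        (lcgk_step k) (PySem.Dict.empty, 0)).2 := by
  simp only [longest_consecutive_gap_k_alt, if_neg hne]

-- the processing order makes every predecessor strictly earlier
theorem lcgk_order_pairwise (nums : List Int) (k : Int) :
    ∃ R : Int → Int → Prop, (∀ a b, R a b → b ≠ a - k) ∧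
      (PySem.List.sorted (PySem.Set.ofList nums) (fun x : Int => x) (decide (k < 0))).Pairwise R := by
  by_cases hneg : k < 0
  · refine ⟨fun a b => b ≤ a ∧ a ≠ b, ?_, ?_⟩
    · rintro a b ⟨hle, hne⟩ rfl
      omega
    · have hdec : decide (k < 0) = true := by simp [hneg]
      rw [hdec]
      exact (PySem.List.sorted_pairwise_rev (PySem.Set.ofList nums) (fun x : Int => x)).and
        (((PySem.List.sorted_perm (PySem.Set.ofList nums) (fun x : Int => x) true).nodup_iff).mpr
          (PySem.Set.nodup_ofList nums))
  · refine ⟨fun a b => a < b, ?_, ?_⟩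
    · rintro a b hlt rfl
      omega
    · have hdec : decide (k < 0) = false := by simp [hneg]
      rw [hdec]
      exact PySem.List.sorted_ofList_pairwise_lt nums

-- the main equivalence for k ≠ 0
theorem lcgk_main (nums : List Int) (k : Int) (hne : nums ≠ []) (hk : k ≠ 0) :
    longest_consecutive_gap_k nums k = longest_consecutive_gap_k_alt nums k := by
  have hS : (PySem.Set.ofList nums).Nodup := PySem.Set.nodup_ofList nums
  have hlen : (PySem.Set.ofList nums).length ≤ nums.length := PySem.Set.length_ofList_le nums
  obtain ⟨R, hR, hpw⟩ := lcgk_order_pairwise nums k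
  have hmemo : ∀ a : Int,
      a ∈ PySem.List.sorted (PySem.Set.ofList nums) (fun x : Int => x) (decide (k < 0)) ↔
        a ∈ PySem.Set.ofList nums :=
    PySem.List.mem_sorted (PySem.Set.ofList nums) (fun x : Int => x) (decide (k < 0))
  have hkey := lcgk_B_inv (PySem.Set.ofList nums) k R hk hR
    (PySem.List.sorted (PySem.Set.ofList nums) (fun x : Int => x) (decide (k < 0))) []
    PySem.Dict.empty 0
    (fun a _ hak => Or.inr ((hmemo (a - k)).mpr hak))
    hpw
    (fun a ha => (hmemo a).mp ha)
    (by intro a ha; simp at ha)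
    (by intro y hy; simp at hy)
    (fun y _ => PySem.Dict.get?_empty y)
    le_rfl
    (by intro y hy; simp at hy)
    (Or.inl rfl)
  simp only [List.nil_append] at hkey
  obtain ⟨hr0, hrub, hrmem⟩ := hkey
  rw [lcgk_A_unfold nums k hne, lcgk_B_unfold nums k hne]
  apply le_antisymm
  · -- A ≤ B: each start's walk value is some backward chain length, bounded by B's best
    apply lcgkA_fold_le
    · exact hr0
    · intro x hx hnot
      obtain ⟨e, heS, hew⟩ := lcgk_up_eq_down (PySem.Set.ofList nums) k x hk hx hnot
        nums.length hlen
      rw [hew]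
      exact hrub e ((hmemo e).mpr heS)
  · -- B ≤ A: the best is 0 or a backward chain length, bounded by A's value at that chain's start
    rcases hrmem with h | ⟨y, hy, h⟩
    · rw [h]
      exact lcgkA_fold_ge_acc _ k nums.length _ 0
    · rw [h]
      obtain ⟨s, hsS, hsnot, hle⟩ := lcgk_down_le_up (PySem.Set.ofList nums) k y hk
        ((hmemo y).mp hy) nums.length hlen
      exact le_trans hle (lcgkA_fold_ge _ k nums.length _ 0 s hsS hsnot)

-- with k = 0 no element ever passes A's start test
theorem lcgk_A_zero (S : PySem.Set Int) (f : Nat) (l : List Int) :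
    ∀ acc : Int, (∀ x ∈ l, x ∈ S) → l.foldl (lcgkA_step S 0 f) acc = acc := by
  induction l with
  | nil => intro acc _; rfl
  | cons a t IH =>
    intro acc h
    simp only [List.foldl_cons]
    have hstep : lcgkA_step S 0 f acc a = acc := by
      unfold lcgkA_step
      have : PySem.Set.contains S (a - 0) = true := by
        simp [PySem.Set.contains, h a List.mem_cons_self]
      rw [this]
      rfl
    rw [hstep]
    exact IH acc (fun x hx => h x (List.mem_cons_of_mem a hx))

-- with k = 0 every dp value is 1, so B's best over a non-empty order is 1
theorem lcgk_B_zero (l : List Int) :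
    ∀ (dp : PySem.Dict Int Int) (best : Int),
    (∀ a ∈ l, dp.get? a = none) → l.Nodup → (best = 0 ∨ best = 1) →
    (l.foldl (lcgk_step 0) (dp, best)).2 = (if l = [] then best else 1) := by
  induction l with
  | nil => intro dp best _ _ _; simp
  | cons num t IH =>
    intro dp best hnone hnd hb
    have hv : dp.getD (num - 0) 0 + 1 = 1 := by
      rw [PySem.Dict.getD_of_get?_eq_none dp 0
        (by simpa using hnone num List.mem_cons_self)]
      omega
    have hstep : List.foldl (lcgk_step 0) (dp, best) (num :: t) =
        List.foldl (lcgk_step 0) (dp.insert num 1, if 1 > best then 1 else best) t := by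
      simp only [List.foldl_cons, lcgk_step, hv]
    rw [hstep]
    have hrec := IH (dp.insert num 1) (if 1 > best then 1 else best)
      (by
        intro a ha
        have hne : a ≠ num := by
          rintro rfl
          exact (List.nodup_cons.mp hnd).1 ha
        rw [PySem.Dict.get?_insert_of_ne dp _ hne]
        exact hnone a (List.mem_cons_of_mem num ha))
      (List.nodup_cons.mp hnd).2
      (by rcases hb with rfl | rfl <;> simp)
    rw [hrec]
    have hb1 : (if (1 : Int) > best then (1 : Int) else best) = 1 := by
      rcases hb with rfl | rfl <;> simp
    rw [hb1]
    simp

-- the sorted order of a set built from a non-empty list is non-empty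
theorem lcgk_order_ne_nil (nums : List Int) (rev : Bool) (hne : nums ≠ []) :
    PySem.List.sorted (PySem.Set.ofList nums) (fun x : Int => x) rev ≠ [] := by
  intro h
  rw [PySem.List.sorted_eq_nil_iff] at h
  obtain ⟨x, hx⟩ := List.exists_mem_of_ne_nil nums hne
  have : x ∈ PySem.Set.ofList nums := (PySem.Set.mem_ofList nums x).mpr hx
  rw [h] at this
  simp at this

-- ===== VERDICT (by name: the statement is the Claim_ definition above) =====
theorem longest_consecutive_gap_k_spec : Claim_unchanged_longest_consecutive_gap_k := by
  intro nums k _ hD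
  by_cases hne : nums = []
  · subst hne; rfl
  · have hk : k ≠ 0 := by
      intro h
      exact hD ⟨hne, h⟩
    exact lcgk_main nums k hne hk

theorem longest_consecutive_gap_k_changed : Claim_changed_longest_consecutive_gap_k := by
  unfold Claim_changed_longest_consecutive_gap_k; decide

theorem longest_consecutive_gap_k_tight : Claim_exact_longest_consecutive_gap_k := by
  intro nums k _ hD
  obtain ⟨hne, rfl⟩ := hD
  have hA : longest_consecutive_gap_k nums 0 = 0 := by
    rw [lcgk_A_unfold nums 0 hne]
    exact lcgk_A_zero (PySem.Set.ofList nums) nums.length (PySem.Set.ofList nums) 0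
      (fun x hx => hx)
  have hB : longest_consecutive_gap_k_alt nums 0 = 1 := by
    rw [lcgk_B_unfold nums 0 hne]
    have hnen := lcgk_order_ne_nil nums (decide ((0 : Int) < 0)) hne
    rw [lcgk_B_zero _ PySem.Dict.empty 0
      (fun a _ => PySem.Dict.get?_empty a)
      (((PySem.List.sorted_perm (PySem.Set.ofList nums) (fun x : Int => x)
        (decide ((0 : Int) < 0))).nodup_iff).mpr (PySem.Set.nodup_ofList nums))
      (Or.inl rfl)]
    rw [if_neg hnen]
  rw [hA, hB]
  omega
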